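-- pv_equiv track=rewrite | github.com/rafaporci/ai-masters-repo | challenge2-routing-optmizer/optimizer/base_functions.py | get_location_index
-- ===== SOURCE A (Python) =====
-- def get_location_index(_map):
--     locations = set()
--     for origins, connections in _map.items():
--         locations.add(origins)
--         locations.update(conn for conn in connections)
--     locations = list(locations)
--     locations.sort()
--     return locations
-- ===== SOURCE B (Python) =====
-- def _insert_unique(sorted_list, loc):
--     # binary search for the leftmost position not below loc; insert unless present
--     lo, hi = 0, len(sorted_list)
--     while lo < hi:
--         mid = (lo + hi) // 2
--         if sorted_list[mid] < loc:
--             lo = mid + 1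
--         else:
--             hi = mid
--     if lo == len(sorted_list) or sorted_list[lo] != loc:
--         sorted_list.insert(lo, loc)
--
--
-- def get_location_index(_map):
--     result = []
--     for origin, connections in _map.items():
--         _insert_unique(result, origin)
--         for conn in connections:
--             _insert_unique(result, conn)
--     return result
-- ===== Notes on version B (the rewrite author's own statement) =====
-- stated objective: alternative
-- what changed: Replaces hash-set accumulation followed by a global sort with an incremental ordered insert: each location is binary-searched into its position in an always-sorted duplicate-free result list, so B builds no set and never calls sort.
import Mathlib
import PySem

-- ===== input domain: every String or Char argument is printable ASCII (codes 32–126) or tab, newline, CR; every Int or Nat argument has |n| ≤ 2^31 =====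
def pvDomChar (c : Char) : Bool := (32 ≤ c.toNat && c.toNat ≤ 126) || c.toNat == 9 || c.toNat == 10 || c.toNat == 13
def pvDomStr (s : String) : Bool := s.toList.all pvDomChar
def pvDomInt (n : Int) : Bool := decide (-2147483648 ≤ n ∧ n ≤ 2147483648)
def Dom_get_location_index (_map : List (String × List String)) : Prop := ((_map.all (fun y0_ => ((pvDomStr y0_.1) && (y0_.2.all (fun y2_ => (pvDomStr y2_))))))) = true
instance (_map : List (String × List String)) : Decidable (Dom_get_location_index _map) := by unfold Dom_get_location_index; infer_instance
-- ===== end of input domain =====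

-- B builds no set and never calls sort: it keeps the result sorted and duplicate-free by
-- binary-searching each location's ordered position and inserting it there unless present.

-- ===== PORT A =====
-- locations = set(); for origins, connections in _map.items(): add / update; list it and sort
def get_location_index (_map : List (String × List String)) : List String :=
  let locations : PySem.Set String :=
    _map.foldl (fun s p => PySem.Set.update (PySem.Set.add s p.1) p.2) PySem.Set.empty
  PySem.List.sorted locations (fun x => x) false

-- ===== PORT B =====
-- the 'while lo < hi' binary-search loop of _insert_unique (indices stay in [0, len], so
-- sorted_list[mid] is the in-range pyGetD)
def pvBisect (xs : List String) (loc : String) (lo hi : Nat) : Nat :=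
  if h : lo < hi then
    let mid := (lo + hi) / 2
    if PySem.List.pyGetD xs (mid : Int) "" < loc then pvBisect xs loc (mid + 1) hi
    else pvBisect xs loc lo mid
  else lo
termination_by hi - lo
decreasing_by all_goals omega

-- _insert_unique: bisect, then 'if lo == len(...) or sorted_list[lo] != loc: insert(lo, loc)'
def pvInsertUnique (sorted_list : List String) (loc : String) : List String :=
  let lo := pvBisect sorted_list loc 0 sorted_list.length
  if lo = sorted_list.length ∨ PySem.List.pyGetD sorted_list (lo : Int) "" ≠ loc then
    PySem.List.insert sorted_list (lo : Int) loc
  else sorted_list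

-- result = []; insert origin, then each connection, in encounter order
def get_location_index_alt (_map : List (String × List String)) : List String :=
  _map.foldl (fun result p => p.2.foldl pvInsertUnique (pvInsertUnique result p.1)) []

-- ===== PRECONDITION & SPEC =====
def Spec_get_location_index (_map : List (String × List String)) (out : List String) : Prop := out = get_location_index_alt _map
instance (_map : List (String × List String)) (out : List String) : Decidable (Spec_get_location_index _map out) := by unfold Spec_get_location_index; infer_instance

-- ===== CLAIM (what is proved, stated in full; the proofs are below) =====
def Claim_equal_get_location_index : Prop := ∀ (_map : List (String × List String)), Dom_get_location_index _map → Spec_get_location_index _map (get_location_index _map)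

-- ===== LEMMAS AND PROOFS =====

-- PySem.List.insert at an in-range nonnegative index is take/drop
theorem pv_insert_take_drop (xs : List String) (n : Nat) (h : n ≤ xs.length) (v : String) :
    PySem.List.insert xs (n : Int) v = xs.take n ++ v :: xs.drop n := by
  simp only [PySem.List.insert, PySem.List.sliceIndices]
  norm_num
  split_ifs with h1
  · omega
  · have : (min (n : Int) (xs.length : Int)).toNat = n := by omega
    rw [this]

-- on a strictly sorted list, the loop returns the leftmost index whose element is not below loc
theorem pvBisect_spec (xs : List String) (loc : String) (hs : xs.Pairwise (· < ·)) :
    ∀ (n lo hi : Nat), hi - lo ≤ n → lo ≤ hi → hi ≤ xs.length →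
    (∀ i, i < lo → ∀ h : i < xs.length, xs[i] < loc) →
    (∀ i, hi ≤ i → ∀ h : i < xs.length, ¬ xs[i] < loc) →
    pvBisect xs loc lo hi ≤ xs.length ∧
      (∀ i, i < pvBisect xs loc lo hi → ∀ h : i < xs.length, xs[i] < loc) ∧
      (∀ i, pvBisect xs loc lo hi ≤ i → ∀ h : i < xs.length, ¬ xs[i] < loc) := by
  intro n
  induction n with
  | zero =>
      intro lo hi hn hle hhi hlow hhigh
      have : lo = hi := by omega
      subst this
      rw [pvBisect, dif_neg (by omega)]
      exact ⟨by omega, hlow, hhigh⟩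
  | succ n ih =>
      intro lo hi hn hle hhi hlow hhigh
      rw [pvBisect]
      by_cases h : lo < hi
      · rw [dif_pos h]
        have hmid1 : lo ≤ (lo + hi) / 2 := by omega
        have hmid2 : (lo + hi) / 2 < hi := by omega
        have hmidlen : (lo + hi) / 2 < xs.length := by omega
        have hget : PySem.List.pyGetD xs (((lo + hi) / 2 : Nat) : Int) "" = xs[(lo + hi) / 2] := by
          rw [PySem.List.pyGetD_natCast]
          exact List.getD_eq_getElem xs "" hmidlen
        by_cases hc : PySem.List.pyGetD xs (((lo + hi) / 2 : Nat) : Int) "" < loc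
        · rw [if_pos hc]
          refine ih ((lo + hi) / 2 + 1) hi (by omega) (by omega) hhi ?_ hhigh
          intro i hi' h'
          rcases Nat.lt_or_ge i ((lo + hi) / 2) with hlt | hge
          · have hij : xs[i] < xs[(lo + hi) / 2] :=
              (List.pairwise_iff_getElem.mp hs) i ((lo + hi) / 2) h' hmidlen hlt
            exact lt_trans hij (hget ▸ hc)
          · have : i = (lo + hi) / 2 := by omega
            subst this
            exact hget ▸ hc
        · rw [if_neg hc]
          refine ih lo ((lo + hi) / 2) (by omega) (by omega) (by omega) hlow ?_
          intro i hge h'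
          rcases Nat.lt_or_ge ((lo + hi) / 2) i with hlt | hge'
          · have hij : xs[(lo + hi) / 2] < xs[i] :=
              (List.pairwise_iff_getElem.mp hs) ((lo + hi) / 2) i hmidlen h' hlt
            rw [hget] at hc
            exact fun hl => hc (lt_trans hij hl)
          · have : i = (lo + hi) / 2 := by omega
            subst this
            exact hget ▸ hc
      · rw [dif_neg h]
        have : lo = hi := by omega
        subst this
        exact ⟨by omega, hlow, hhigh⟩

-- one ordered insert preserves strict sortedness and adds exactly the element
theorem pvInsertUnique_spec (xs : List String) (loc : String) (hs : xs.Pairwise (· < ·)) :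
    (pvInsertUnique xs loc).Pairwise (· < ·)
      ∧ ∀ y, (y ∈ pvInsertUnique xs loc ↔ y ∈ xs ∨ y = loc) := by
  obtain ⟨hr, hlow, hhigh⟩ := pvBisect_spec xs loc hs xs.length 0 xs.length (by omega) (by omega)
    (le_refl _) (by omega) (by omega)
  set r := pvBisect xs loc 0 xs.length with hrdef
  unfold pvInsertUnique
  rw [← hrdef]
  have htake : ∀ a ∈ xs.take r, a < loc := by
    intro a ha
    obtain ⟨i, hi, rfl⟩ := List.mem_take_iff_getElem.mp ha
    exact hlow i (by omega) _
  have hdrop : ∀ b ∈ xs.drop r, ¬ b < loc := by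
    intro b hb
    have hlen : r ≤ xs.length := hr
    obtain ⟨j, hj, rfl⟩ := List.mem_iff_getElem.mp hb
    rw [List.getElem_drop]
    exact hhigh (r + j) (by omega) (by simp at hj; omega)
  by_cases hre : r = xs.length
  · -- insertion at the end: every element of xs is below loc
    have hcond : r = xs.length ∨ PySem.List.pyGetD xs (r : Int) "" ≠ loc := Or.inl hre
    rw [if_pos hcond, pv_insert_take_drop xs r hr, hre]
    rw [List.take_length, List.drop_length]
    constructor
    · rw [List.pairwise_append]
      refine ⟨hs, by simp, ?_⟩
      intro a ha b hb
      simp at hb; subst hb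
      exact htake a (by rw [hre, List.take_length]; exact ha)
    · intro y; simp
  · have hrlt : r < xs.length := lt_of_le_of_ne hr hre
    have hget : PySem.List.pyGetD xs (r : Int) "" = xs[r] := by
      rw [PySem.List.pyGetD_natCast]
      exact List.getD_eq_getElem xs "" hrlt
    by_cases heq : xs[r] = loc
    · -- already present: no insertion
      have hcond : ¬ (r = xs.length ∨ PySem.List.pyGetD xs (r : Int) "" ≠ loc) := by
        rw [hget, heq]; simp [hre]
      rw [if_neg hcond]
      refine ⟨hs, fun y => ?_⟩
      have hmem : loc ∈ xs := heq ▸ List.getElem_mem hrlt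
      constructor
      · exact Or.inl
      · rintro (h | rfl)
        · exact h
        · exact hmem
    · -- strict gap: insert before position r
      have hcond : r = xs.length ∨ PySem.List.pyGetD xs (r : Int) "" ≠ loc := by
        rw [hget]; exact Or.inr heq
      have hlocr : loc < xs[r] := lt_of_le_of_ne (not_lt.mp (hhigh r (le_refl r) hrlt)) (Ne.symm heq)
      rw [if_pos hcond, pv_insert_take_drop xs r hr]
      have hdrop' : ∀ b ∈ xs.drop r, loc < b := by
        intro b hb
        exact lt_of_le_of_ne (not_lt.mp (hdrop b hb)) (by
          rintro rfl
          obtain ⟨j, hj, hbe⟩ := List.mem_iff_getElem.mp hb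
          rw [List.getElem_drop] at hbe
          simp at hj
          rcases Nat.eq_zero_or_pos j with hj0 | hjpos
          · subst hj0
            simp only [Nat.add_zero] at hbe
            exact heq hbe
          · have hlt2 : xs[r] < xs[r + j] :=
              (List.pairwise_iff_getElem.mp hs) r (r + j) hrlt (by omega) (by omega)
            rw [hbe] at hlt2
            exact absurd hlt2 (not_lt.mpr (le_of_lt hlocr)) )
      constructor
      · rw [List.pairwise_append]
        refine ⟨hs.sublist (List.take_sublist r xs), ?_, ?_⟩
        · rw [List.pairwise_cons]
          exact ⟨hdrop', hs.sublist (List.drop_sublist r xs)⟩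
        · intro a ha b hb
          rcases List.mem_cons.mp hb with rfl | hb
          · exact htake a ha
          · exact lt_trans (htake a ha) (hdrop' b hb)
      · intro y
        have hsplit : y ∈ xs.take r ∨ y ∈ xs.drop r ↔ y ∈ xs := by
          rw [← List.mem_append, List.take_append_drop]
        simp only [List.mem_append, List.mem_cons]
        rw [← hsplit]
        tauto

-- folding ordered inserts over a list: still sorted, membership is the union
theorem pvInsertUnique_fold_spec (xs : List String) : ∀ (acc : List String), acc.Pairwise (· < ·) →
    (xs.foldl pvInsertUnique acc).Pairwise (· < ·)
      ∧ ∀ y, (y ∈ xs.foldl pvInsertUnique acc ↔ y ∈ acc ∨ y ∈ xs) := by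
  induction xs with
  | nil => intro acc h; exact ⟨h, fun y => by simp⟩
  | cons x t ih =>
      intro acc h
      obtain ⟨h1, h2⟩ := pvInsertUnique_spec acc x h
      obtain ⟨g1, g2⟩ := ih (pvInsertUnique acc x) h1
      refine ⟨by simpa using g1, fun y => ?_⟩
      simp only [List.foldl_cons] at *
      rw [g2 y, h2 y]; simp; tauto

-- B's nested loops are one fold of ordered inserts over the flat location list
theorem pv_nested_eq_flat (l : List (String × List String)) (init : List String) :
    l.foldl (fun result p => p.2.foldl pvInsertUnique (pvInsertUnique result p.1)) init
      = (l.flatMap (fun p => p.1 :: p.2)).foldl pvInsertUnique init := by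
  induction l generalizing init with
  | nil => simp
  | cons p t ih => simp [List.flatMap_cons, List.foldl_append, ih, List.foldl_cons]

-- A's set loop is set(flat list): each step consumes one key and its connections
theorem pv_setFold_eq_ofList (l : List (String × List String)) (s : PySem.Set String) :
    l.foldl (fun s p => PySem.Set.update (PySem.Set.add s p.1) p.2) s
      = PySem.Set.update s (l.flatMap (fun p => p.1 :: p.2)) := by
  induction l generalizing s with
  | nil => simp [PySem.Set.update]
  | cons p t ih =>
      simp only [List.foldl_cons, List.flatMap_cons]
      rw [ih, PySem.Set.update_append, PySem.Set.update_cons]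

-- ===== VERDICT (by name: the statement is the Claim_ definition above) =====
theorem get_location_index_spec : Claim_equal_get_location_index := by
  intro _map _
  unfold Spec_get_location_index get_location_index get_location_index_alt
  rw [pv_nested_eq_flat, pv_setFold_eq_ofList]
  set flat := _map.flatMap (fun p => p.1 :: p.2) with hflat
  rw [show PySem.Set.update PySem.Set.empty flat = PySem.Set.ofList flat from
    PySem.Set.update_empty flat]
  obtain ⟨h1, h2⟩ := pvInsertUnique_fold_spec flat [] (by simp)
  have hperm : (flat.foldl pvInsertUnique []).Perm (PySem.Set.ofList flat) := by
    apply (List.perm_ext_iff_of_nodup h1.nodup (PySem.Set.nodup_ofList flat)).mpr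
    intro y
    rw [h2 y]
    simp [PySem.Set.mem_ofList]
  exact PySem.List.sorted_eq_of_perm_of_pairwise_lt _ _ _ hperm (by simpa using h1)
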